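-- pv_equiv track=rewrite | github.com/OghenefegaOmajene/Python-Tasks | collatzConjecture.py | findMaxSteps
-- ===== SOURCE A (Python) =====
-- def collatzSteps(n):
--     """
--     Calculate the number of steps to reach 1 using the Collatz conjecture rules.
--
--     Rules:
--     - If n is even: n = n / 2
--     - If n is odd: n = 3 * n + 1
--
--     Args:
--         n (int): Starting positive integer
--
--     Returns:
--         int: Number of steps to reach 1
--
--     Raises:
--         ValueError: If n is not a positive integer
--     """
--     if not isinstance(n, int) or n <= 0:
--         raise ValueError("Input must be a positive integer")
--
--     if n == 1:
--         return 0
--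
--     steps = 0
--     while n != 1:
--         if n % 2 == 0:
--             n = n // 2  # Even: divide by 2
--         else:
--             n = 3 * n + 1  # Odd: multiply by 3 and add 1
--         steps += 1
--
--     return steps
--
-- def findMaxSteps(limit):
--     """
--     Find the number (up to limit) that takes the most steps to reach 1.
--
--     Args:
--         limit (int): Upper limit to check
--
--     Returns:
--         tuple: (number, max_steps)
--     """
--     max_steps = 0
--     max_number = 1
--
--     for i in range(1, limit + 1):
--         steps = collatzSteps(i)
--         if steps > max_steps:
--             max_steps = steps
--             max_number = i
--
--     return max_number, max_steps
-- ===== SOURCE B (Python) =====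
-- def _collatzLen(n):
--     return 0 if n == 1 else 1 + _collatzLen(3 * n + 1 if n % 2 else n // 2)
--
-- def findMaxSteps(limit):
--     if limit < 1:
--         return 1, 0
--     counts = [_collatzLen(i) for i in range(1, limit + 1)]
--     m = max(counts)
--     return counts.index(m) + 1, m
-- ===== Notes on version B (the rewrite author's own statement) =====
-- stated objective: simpler
-- what changed: Replaces the explicit running-max loop with an iterative step counter by a recursive step-count helper plus a comprehension, max() and index() to pick the first argmax.
import Mathlib
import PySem

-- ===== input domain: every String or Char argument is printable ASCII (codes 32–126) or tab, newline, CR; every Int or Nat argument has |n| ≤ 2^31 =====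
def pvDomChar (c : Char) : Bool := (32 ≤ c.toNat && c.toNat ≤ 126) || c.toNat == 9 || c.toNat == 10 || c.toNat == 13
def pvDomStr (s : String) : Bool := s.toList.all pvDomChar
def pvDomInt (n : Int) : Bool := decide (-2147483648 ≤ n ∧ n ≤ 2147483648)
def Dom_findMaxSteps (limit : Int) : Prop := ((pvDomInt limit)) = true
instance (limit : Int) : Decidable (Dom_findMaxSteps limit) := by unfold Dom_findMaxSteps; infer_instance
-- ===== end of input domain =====

-- B replaces A's explicit running-max loop (fresh iterative step count per i) by a recursive
-- step-count helper plus map / max / first-index; same asymptotic cost, plainer decomposition.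


-- fuel bound for the Collatz loops (Python iterates/recurses unboundedly; the loop exits as
-- soon as n reaches 1, so any fuel larger than the trajectory length gives the Python value)
def pvFuel : Nat := 1000000

-- ===== PORT A =====
-- 'while n != 1: …' of collatzSteps, fuel-guarded; accumulator 'steps' as in the Python
def collatzLoopA : Nat → Int → Int → Int
  | 0, _, steps => steps
  | f + 1, n, steps =>
    if n = 1 then steps
    else if PySem.Int.mod n 2 = 0 then collatzLoopA f (PySem.Int.floordiv n 2) (steps + 1)
    else collatzLoopA f (3 * n + 1) (steps + 1)

-- collatzSteps; the ValueError guard for n ≤ 0 is unreachable (findMaxSteps calls it with i ≥ 1)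
def collatzStepsA (n : Int) : Int := if n = 1 then 0 else collatzLoopA pvFuel n 0

def findMaxSteps (limit : Int) : Int × Int :=
  (PySem.List.pyRange 1 (limit + 1) 1).foldl
    (fun acc i =>
      let steps := collatzStepsA i
      if steps > acc.2 then (i, steps) else acc)
    (1, 0)

-- ===== PORT B =====
-- _collatzLen, the recursive step counter, fuel-guarded
def collatzLenB : Nat → Int → Int
  | 0, _ => 0
  | f + 1, n =>
    if n = 1 then 0
    else 1 + collatzLenB f (if PySem.Int.mod n 2 ≠ 0 then 3 * n + 1 else PySem.Int.floordiv n 2)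

def findMaxSteps_alt (limit : Int) : Int × Int :=
  if limit < 1 then (1, 0)
  else
    let counts := (PySem.List.pyRange 1 (limit + 1) 1).map (collatzLenB pvFuel)
    match PySem.List.max? counts (fun x => x) with
    | some m => ((((PySem.List.index? counts m).getD 0 + 1 : Nat) : Int), m)
    | none => (1, 0)  -- unreachable: counts is nonempty when limit ≥ 1

-- ===== PRECONDITION & SPEC =====
def Spec_findMaxSteps (limit : Int) (out : Int × Int) : Prop := out = findMaxSteps_alt limit
instance (limit : Int) (out : Int × Int) : Decidable (Spec_findMaxSteps limit out) := by unfold Spec_findMaxSteps; infer_instance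

-- ===== CLAIM (what is proved, stated in full; the proofs are below) =====
def Claim_equal_findMaxSteps : Prop := ∀ (limit : Int), Dom_findMaxSteps limit → Spec_findMaxSteps limit (findMaxSteps limit)

-- ===== LEMMAS AND PROOFS =====

-- the two fuel-guarded Collatz counters agree (they take the same steps, so also at exhaustion)
lemma collatzLoopA_eq_lenB (f : Nat) : ∀ (n steps : Int),
    collatzLoopA f n steps = steps + collatzLenB f n := by
  induction f with
  | zero => intro n steps; simp [collatzLoopA, collatzLenB]
  | succ f ih =>
    intro n steps
    by_cases h1 : n = 1
    · simp [collatzLoopA, collatzLenB, h1]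
    · simp only [collatzLoopA, collatzLenB, if_neg h1]
      by_cases h2 : PySem.Int.mod n 2 = 0
      · rw [if_pos h2, if_neg (not_not_intro h2), ih]
        ring
      · rw [if_neg h2, if_pos h2, ih]
        ring

lemma stepsA_eq_lenB : collatzStepsA = collatzLenB pvFuel := by
  funext n
  by_cases h1 : n = 1
  · subst h1; simp [collatzStepsA]; decide
  · simp [collatzStepsA, h1, collatzLoopA_eq_lenB]

-- A's loop as a named fold (proof-side abbreviation)
def pvR (limit : Int) : Int × Int :=
  (PySem.List.pyRange 1 (limit + 1) 1).foldl
    (fun acc i =>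
      let steps := collatzLenB pvFuel i
      if steps > acc.2 then (i, steps) else acc)
    (1, 0)

lemma findMaxSteps_eq_pvR (limit : Int) : findMaxSteps limit = pvR limit := by
  simp only [findMaxSteps, pvR, stepsA_eq_lenB]

lemma max?_append_singleton (xs : List Int) (y m : Int)
    (h : PySem.List.max? xs (fun x => x) = some m) :
    PySem.List.max? (xs ++ [y]) (fun x => x) = some (if m < y then y else m) := by
  cases xs with
  | nil =>
    have hnone : PySem.List.max? ([] : List Int) (fun x => x) = none := by decide
    rw [hnone] at h
    cases h
  | cons x t =>
    rw [PySem.List.max?_id_cons] at h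
    rw [List.cons_append, PySem.List.max?_id_cons, List.foldl_append]
    simp only [List.foldl]
    injection h with h
    subst h
    rcases lt_or_ge (List.foldl max x t) y with hlt | hge
    · rw [if_pos hlt, max_eq_right hlt.le]
    · rw [if_neg (not_lt.mpr hge), max_eq_left hge]

-- main invariant of A's fold: its second component is max(counts), its first component minus
-- one is the first index of that max in counts, and the first component is ≥ 1
lemma pvR_invariant (limit : Int) (h : 1 ≤ limit) :
    PySem.List.max? ((PySem.List.pyRange 1 (limit + 1) 1).map (collatzLenB pvFuel)) (fun x => x)
        = some (pvR limit).2 ∧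
    PySem.List.index? ((PySem.List.pyRange 1 (limit + 1) 1).map (collatzLenB pvFuel)) (pvR limit).2
        = some ((pvR limit).1 - 1).toNat ∧
    1 ≤ (pvR limit).1 := by
  induction limit, h using Int.le_induction with
  | base => refine ⟨by decide, by decide, by decide⟩
  | succ k hk ih =>
    obtain ⟨hmax, hidx, hpos⟩ := ih
    have hsplit : PySem.List.pyRange 1 (k + 1 + 1) 1
        = PySem.List.pyRange 1 (k + 1) 1 ++ [k + 1] :=
      PySem.List.pyRange_one_succ_right (by omega)
    set counts := (PySem.List.pyRange 1 (k + 1) 1).map (collatzLenB pvFuel) with hc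
    have hcounts' : (PySem.List.pyRange 1 (k + 1 + 1) 1).map (collatzLenB pvFuel)
        = counts ++ [collatzLenB pvFuel (k + 1)] := by
      rw [hsplit, List.map_append]; rfl
    have hm : (pvR k).2 ∈ counts := PySem.List.max?_mem hmax
    have hle : ∀ c ∈ counts, c ≤ (pvR k).2 := by
      intro c hcmem; exact PySem.List.max?_isMax hmax c hcmem
    set y := collatzLenB pvFuel (k + 1) with hy
    have hRstep : pvR (k + 1)
        = (if y > (pvR k).2 then (k + 1, y) else pvR k) := by
      rw [pvR, hsplit, List.foldl_append]
      rfl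
    by_cases hgt : y > (pvR k).2
    · -- new maximum at position k+1
      rw [hRstep, if_pos hgt]
      have hnot : y ∉ counts := fun hmem => absurd (hle y hmem) (not_le.mpr hgt)
      refine ⟨?_, ?_, by change (1 : Int) ≤ k + 1; omega⟩
      · rw [hcounts', max?_append_singleton counts y _ hmax, if_pos hgt]
      · rw [hcounts']
        show PySem.List.index? (counts ++ [y]) y = some ((k + 1) - 1).toNat
        rw [PySem.List.index?_append_singleton_self _ _ hnot]
        have hlen : counts.length = k.toNat := by
          rw [hc, List.length_map, PySem.List.length_pyRange_one]
          omega
        rw [hlen]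
        congr 1
        omega
    · -- old maximum stays, with its old first index
      rw [hRstep, if_neg hgt]
      refine ⟨?_, ?_, hpos⟩
      · rw [hcounts', max?_append_singleton counts y _ hmax,
          if_neg (by omega : ¬ (pvR k).2 < y)]
      · rw [hcounts', PySem.List.index?_append_of_mem _ hm, hidx]

-- ===== VERDICT (by name: the statement is the Claim_ definition above) =====
theorem findMaxSteps_spec : Claim_equal_findMaxSteps := by
  intro limit _
  show findMaxSteps limit = findMaxSteps_alt limit
  rw [findMaxSteps_eq_pvR]
  by_cases hlt : limit < 1
  · rw [findMaxSteps_alt, if_pos hlt, pvR,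
      PySem.List.pyRange_one_eq_nil (by omega)]
    rfl
  · obtain ⟨hmax, hidx, hpos⟩ := pvR_invariant limit (by omega)
    rw [findMaxSteps_alt, if_neg hlt]
    simp only [hmax, hidx, Option.getD_some]
    have : ((((pvR limit).1 - 1).toNat + 1 : Nat) : Int) = (pvR limit).1 := by
      push_cast; omega
    rw [this]
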